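-- pv_equiv track=rewrite | github.com/Se7enSquared/PyBitesRepo | 3/wordvalue.py | max_word_value
-- ===== SOURCE A (Python) =====
-- scrabble_scores = [
--     (1, "E A O I N R T L S U"),
--     (2, "D G"),
--     (3, "B C M P"),
--     (4, "F H V W Y"),
--     (5, "K"),
--     (8, "J X"),
--     (10, "Q Z"),
-- ]
--
-- def calc_word_value(word):
--     """Given a word calculate its value using the LETTER_SCORES dict"""
--     score = 0
--     for letter in word:
--         for score_tuple in scrabble_scores:
--             if letter.upper() in score_tuple[1].split(" "):
--                 score += score_tuple[0]
--                 continue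
--     return score
--
-- def max_word_value(words):
--     """Given a list of words calculate the word with the maximum value and return it"""
--     max_value = 0
--     max_word = ''
--     for word in words:
--         word_value = calc_word_value(word)
--         if word_value > max_value:
--             max_value = word_value
--             max_word = word
--     return max_word
-- ===== SOURCE B (Python) =====
-- scrabble_scores = [
--     (1, "E A O I N R T L S U"),
--     (2, "D G"),
--     (3, "B C M P"),
--     (4, "F H V W Y"),
--     (5, "K"),
--     (8, "J X"),
--     (10, "Q Z"),
-- ]
--
-- # 26-entry score table indexed by ord(letter) - ord('A')
-- POINTS = [0] * 26
-- for _pts, _letters in scrabble_scores: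
--     for _letter in _letters.split(" "):
--         POINTS[ord(_letter) - 65] = _pts
--
--
-- def _word_score(word):
--     total = 0
--     for c in word.upper():
--         i = ord(c) - 65
--         if 0 <= i < 26:
--             total += POINTS[i]
--     return total
--
--
-- def max_word_value(words):
--     """Given a list of words calculate the word with the maximum value and return it"""
--     scores = [_word_score(w) for w in words]
--     best = max(scores, default=0)
--     return words[scores.index(best)] if best > 0 else ''
-- ===== Notes on version B (the rewrite author's own statement) =====
-- stated objective: faster
-- what changed: Scoring uses a flat 26-entry array indexed by ord(c)-65 on the uppercased word instead of A's per-character scan over the 7 tuples with a fresh split each time, and the winner is picked in staged passes (score list via map, then max with default 0, then first index of the max) instead of A's single-pass running-max accumulator; strict-greater/first-wins and the '' result for empty or all-zero lists are preserved because scores are nonnegative and .index returns the first occurrence.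
import Mathlib
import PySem

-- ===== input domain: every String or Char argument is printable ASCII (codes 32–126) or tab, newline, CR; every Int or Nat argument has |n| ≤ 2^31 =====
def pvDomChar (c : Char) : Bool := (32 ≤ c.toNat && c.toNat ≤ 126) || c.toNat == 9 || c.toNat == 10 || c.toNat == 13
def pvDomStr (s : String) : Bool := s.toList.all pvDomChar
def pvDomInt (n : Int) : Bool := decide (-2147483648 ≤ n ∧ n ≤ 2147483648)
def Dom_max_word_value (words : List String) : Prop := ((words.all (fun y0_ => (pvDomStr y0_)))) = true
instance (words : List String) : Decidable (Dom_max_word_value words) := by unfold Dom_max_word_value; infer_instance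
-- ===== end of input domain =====

-- B scores each word through a flat 26-entry array indexed by ord(c)-65 and picks the
-- winner in staged passes (map to scores, max with default 0, first index of the max)
-- instead of A's per-character tuple scan and single-pass running-max loop.

-- ===== PORT A =====
def scrabble_scores : List (Int × String) :=
  [(1, "E A O I N R T L S U"), (2, "D G"), (3, "B C M P"), (4, "F H V W Y"),
   (5, "K"), (8, "J X"), (10, "Q Z")]

-- `split(" ")` with a nonempty literal separator never fails, so `.getD []` is exact.
def calc_word_value (word : String) : Int :=
  word.toList.foldl (fun score letter =>
    scrabble_scores.foldl (fun score t =>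
      if ((PySem.Str.split? t.2 " ").getD []).contains (PySem.Str.upper (String.ofList [letter]))
      then score + t.1 else score) score) 0

def max_word_value (words : List String) : String :=
  (words.foldl (fun (st : Int × String) word =>
      let word_value := calc_word_value word
      if word_value > st.1 then (word_value, word) else st) (0, "")).2

-- ===== PORT B =====
-- POINTS[ord(L)-65] = pts: each split piece is one uppercase letter, so the index is in
-- range 0..25 and `pySetD` (Python list assignment) is exact; `ord(L)` of the 1-char
-- string L is its head character's code.
def POINTS : List Int :=
  scrabble_scores.foldl (fun a t =>
    ((PySem.Str.split? t.2 " ").getD []).foldl (fun a L =>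
      PySem.List.pySetD a (((L.toList.headD ' ').toNat : Int) - 65) t.1) a)
    (List.replicate 26 0)

def word_score (word : String) : Int :=
  (PySem.Str.upper word).toList.foldl (fun total c =>
    let i : Int := (c.toNat : Int) - 65
    -- POINTS[i] is guarded by 0 <= i < 26, so `pyGetD` is exact here
    if 0 ≤ i ∧ i < 26 then total + PySem.List.pyGetD POINTS i 0 else total) 0

def max_word_value_alt (words : List String) : String :=
  let scores := words.map word_score
  let best := PySem.List.maxD scores (fun x => x) 0
  -- `scores.index(best)` succeeds and `words[...]` is in range whenever best > 0
  -- (then scores is nonempty and best ∈ scores), so `.getD` is exact on both.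
  if best > 0 then words.getD ((PySem.List.index? scores best).getD 0) "" else ""

-- ===== PRECONDITION & SPEC =====
def Spec_max_word_value (words : List String) (out : String) : Prop := out = max_word_value_alt words
instance (words : List String) (out : String) : Decidable (Spec_max_word_value words out) := by unfold Spec_max_word_value; infer_instance

-- ===== CLAIM (what is proved, stated in full; the proofs are below) =====
def Claim_equal_max_word_value : Prop := ∀ (words : List String), Dom_max_word_value words → Spec_max_word_value words (max_word_value words)

-- ===== LEMMAS AND PROOFS =====

def pvLetters : List Char :=
  ['E','A','O','I','N','R','T','L','S','U','D','G','B','C','M','P','F','H','V','W','Y','K','J','X','Q','Z']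

lemma upper_single (c : Char) :
    PySem.Str.upper (String.ofList [c]) = String.ofList [PySem.Chars.upperChar c] := by
  have h : (PySem.Str.upper (String.ofList [c])).toList = [PySem.Chars.upperChar c] := by
    rw [PySem.Str.toList_upper]; simp [PySem.Chars.upper]
  conv_lhs => rw [← String.ofList_toList (s := PySem.Str.upper (String.ofList [c]))]
  rw [h]

lemma mem_pvLetters_of_range (u : Char) (h1 : 65 ≤ u.toNat) (h2 : u.toNat ≤ 90) :
    u ∈ pvLetters := by
  have hu : u = Char.ofNat u.toNat := (Char.ofNat_toNat u).symm
  interval_cases h : u.toNat <;> rw [hu] <;> decide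

lemma foldl_shift (l : List (Int × String)) (p : Int × String → Bool) (s : Int) :
    l.foldl (fun sc t => if p t then sc + t.1 else sc) s
      = s + l.foldl (fun sc t => if p t then sc + t.1 else sc) 0 := by
  induction l generalizing s with
  | nil => simp
  | cons h t ih =>
    rw [List.foldl_cons, List.foldl_cons, ih, ih (if p h then 0 + h.1 else 0)]
    by_cases hp : p h <;> simp [hp]
    ring

lemma contains_single (x : Char) (ys : List Char) :
    ((ys.map (fun y => String.ofList [y])).contains (String.ofList [x])) = ys.contains x := by
  induction ys with
  | nil => rfl
  | cons y t ih => simp [String.ofList_inj]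

set_option maxRecDepth 8192 in
-- per-character agreement: A's scan over the 7 tuples gives exactly B's table lookup
lemma char_eq (u : Char) :
    scrabble_scores.foldl (fun sc t =>
        if ((PySem.Str.split? t.2 " ").getD []).contains (String.ofList [u])
        then sc + t.1 else sc) 0
      = (if 0 ≤ (u.toNat : Int) - 65 ∧ (u.toNat : Int) - 65 < 26
         then PySem.List.pyGetD POINTS ((u.toNat : Int) - 65) 0 else 0) := by
  by_cases hx : u ∈ pvLetters
  · fin_cases hx <;> decide
  · have hrange : ¬ (65 ≤ u.toNat ∧ u.toNat ≤ 90) := by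
      intro ⟨h1, h2⟩; exact hx (mem_pvLetters_of_range u h1 h2)
    have hb : ¬ (0 ≤ (u.toNat : Int) - 65 ∧ (u.toNat : Int) - 65 < 26) := by omega
    rw [if_neg hb]
    have h1 : (PySem.Str.split? "E A O I N R T L S U" " ").getD []
        = ['E','A','O','I','N','R','T','L','S','U'].map (fun y => String.ofList [y]) := by decide
    have h2 : (PySem.Str.split? "D G" " ").getD [] = ['D','G'].map (fun y => String.ofList [y]) := by decide
    have h3 : (PySem.Str.split? "B C M P" " ").getD [] = ['B','C','M','P'].map (fun y => String.ofList [y]) := by decide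
    have h4 : (PySem.Str.split? "F H V W Y" " ").getD [] = ['F','H','V','W','Y'].map (fun y => String.ofList [y]) := by decide
    have h5 : (PySem.Str.split? "K" " ").getD [] = ['K'].map (fun y => String.ofList [y]) := by decide
    have h6 : (PySem.Str.split? "J X" " ").getD [] = ['J','X'].map (fun y => String.ofList [y]) := by decide
    have h7 : (PySem.Str.split? "Q Z" " ").getD [] = ['Q','Z'].map (fun y => String.ofList [y]) := by decide
    simp only [pvLetters, List.mem_cons, List.not_mem_nil, or_false, not_or] at hx
    obtain ⟨hE,hA,hO,hI,hN,hR,hT,hL,hS,hU,hD,hG,hB,hC,hM,hP,hF,hH,hV,hW,hY,hK,hJ,hX,hQ,hZ⟩ := hx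
    simp only [scrabble_scores, List.foldl_cons, List.foldl_nil, h1, h2, h3, h4, h5, h6, h7,
      contains_single]
    simp [hE,hA,hO,hI,hN,hR,hT,hL,hS,hU,hD,hG,hB,hC,hM,hP,hF,hH,hV,hW,hY,hK,hJ,hX,hQ,hZ]

lemma calc_eq (word : String) : calc_word_value word = word_score word := by
  unfold calc_word_value word_score
  rw [PySem.Str.toList_upper]
  show _ = (PySem.Chars.upper word.toList).foldl _ 0
  rw [PySem.Chars.upper]
  induction word.toList using List.reverseRecOn with
  | nil => rfl
  | append_singleton cs c ih =>
    rw [List.foldl_append, List.map_append, List.foldl_append, ih]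
    simp only [List.foldl_cons, List.foldl_nil, List.map_cons, List.map_nil, upper_single]
    rw [foldl_shift, char_eq (PySem.Chars.upperChar c)]
    split <;> simp

lemma foldl_max_comm (u : List Int) (a b : Int) :
    u.foldl max (max a b) = max a (u.foldl max b) := by
  induction u generalizing b with
  | nil => rfl
  | cons x t ih => rw [List.foldl_cons, List.foldl_cons, max_assoc, ih]

-- A's running-max loop computes B's staged pick, from any start state
lemma loop_eq (ws : List String) : ∀ (m : Int) (s : String),
    (ws.foldl (fun (st : Int × String) w =>
        if word_score w > st.1 then (word_score w, w) else st) (m, s)).2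
      = if (PySem.List.max? (ws.map word_score) (fun x => x)).getD m > m then
          ws.getD ((PySem.List.index? (ws.map word_score)
            ((PySem.List.max? (ws.map word_score) (fun x => x)).getD m)).getD 0) ""
        else s := by
  induction ws with
  | nil => intro m s; simp [PySem.List.max?]
  | cons w t ih =>
    intro m s
    rw [List.foldl_cons, List.map_cons, PySem.List.max?_id_cons, Option.getD_some]
    cases hmx : PySem.List.max? (t.map word_score) (fun x => x) with
    | none =>
      have ht : t.map word_score = [] := (PySem.List.max?_eq_none_iff _ _).mp hmx
      have ht' : t = [] := by cases t with | nil => rfl | cons a b => simp at ht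
      subst ht'
      by_cases hw : word_score w > m
      · simp [hw]
      · simp [hw]
    | some M2 =>
      have hM1 : (t.map word_score).foldl max (word_score w) = max (word_score w) M2 := by
        cases ht : t.map word_score with
        | nil => rw [ht] at hmx; simp [PySem.List.max?] at hmx
        | cons b u =>
          rw [ht, PySem.List.max?_id_cons, Option.some_inj] at hmx
          rw [List.foldl_cons, foldl_max_comm, hmx]
      have hM2mem : M2 ∈ t.map word_score := PySem.List.max?_mem hmx
      obtain ⟨k, hk⟩ := Option.isSome_iff_exists.mp
        ((PySem.List.index?_isSome_iff _ _).mpr hM2mem)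
      rw [hM1]
      by_cases hw : word_score w > m
      · rw [if_pos hw, ih, hmx, Option.getD_some]
        by_cases h2 : M2 > word_score w
        · have hne : word_score w ≠ M2 := by omega
          have hmax : max (word_score w) M2 = M2 := by omega
          rw [if_pos h2, hmax, if_pos (by omega : M2 > m),
            PySem.List.index?_cons_of_ne _ hne, hk]
          simp
        · have hmax : max (word_score w) M2 = word_score w := by omega
          rw [if_neg h2, hmax, if_pos hw, PySem.List.index?_cons_self]
          simp
      · rw [if_neg hw, ih, hmx, Option.getD_some]
        by_cases h2 : M2 > m
        · have hne : word_score w ≠ M2 := by omega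
          have hmax : max (word_score w) M2 = M2 := by omega
          rw [if_pos h2, hmax, if_pos h2, PySem.List.index?_cons_of_ne _ hne, hk]
          simp
        · rw [if_neg h2, if_neg (by omega : ¬ max (word_score w) M2 > m)]

-- ===== VERDICT (by name: the statement is the Claim_ definition above) =====
theorem max_word_value_spec : Claim_equal_max_word_value := by
  intro words _
  unfold Spec_max_word_value max_word_value
  have hfun : (fun (st : Int × String) word =>
        let word_value := calc_word_value word
        if word_value > st.1 then (word_value, word) else st)
      = (fun (st : Int × String) word =>
        if word_score word > st.1 then (word_score word, word) else st) := by
    funext st word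
    simp only [calc_eq]
  rw [hfun, loop_eq]
  show _ = if PySem.List.maxD (words.map word_score) (fun x => x) 0 > 0 then
      words.getD ((PySem.List.index? (words.map word_score)
        (PySem.List.maxD (words.map word_score) (fun x => x) 0)).getD 0) "" else ""
  rw [show PySem.List.maxD (words.map word_score) (fun x => x) 0
      = (PySem.List.max? (words.map word_score) (fun x => x)).getD 0 from rfl]
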